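-- pv_equiv track=rewrite | github.com/MarcinLigeza/AdventOfCode2023 | AdventOfCode2023/src/6/solution.py | find_border_recursive
-- ===== SOURCE A (Python) =====
-- def calculate_distance(load_time, race_time):
--     return (race_time - load_time) * load_time
--
-- def find_border_recursive(begin, end, record, race_time):
--     if (begin + 1) == end:
--         return begin + 1
--     middle = (begin + end + 1) // 2
--     current_distance = calculate_distance(middle, race_time)
--     if current_distance < record:
--         return find_border_recursive(middle, end, record, race_time)
--     elif current_distance > record:
--         return find_border_recursive(begin, middle, record, race_time)
--     else:
--         return middle + 1
-- ===== SOURCE B (Python) =====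
-- def calculate_distance(load_time, race_time):
--     return (race_time - load_time) * load_time
--
-- def find_border_recursive(begin, end, record, race_time):
--     # offset + shrinking-width search: keep the left edge `lo` and the window
--     # width `gap` instead of two endpoints; halve the width each round.
--     lo, gap = begin, end - begin
--     while gap != 1:
--         half = (gap + 1) // 2
--         m = lo + half
--         d = (race_time - m) * m
--         if d < record:
--             lo, gap = m, gap - half
--         elif d > record:
--             gap = half
--         else:
--             return m + 1
--     return lo + 1
-- ===== Notes on version B (the rewrite author's own statement) =====
-- stated objective: alternative
-- what changed: Replaced the self-recursive two-endpoint binary search by an iterative search over a different state (left edge + window width, halving the width each round, distance inlined), removing all recursion.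
-- outside the precondition, e.g. on find_border_recursive(3, 3, 21, 10): A returns 4, B returns 4
import Mathlib
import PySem

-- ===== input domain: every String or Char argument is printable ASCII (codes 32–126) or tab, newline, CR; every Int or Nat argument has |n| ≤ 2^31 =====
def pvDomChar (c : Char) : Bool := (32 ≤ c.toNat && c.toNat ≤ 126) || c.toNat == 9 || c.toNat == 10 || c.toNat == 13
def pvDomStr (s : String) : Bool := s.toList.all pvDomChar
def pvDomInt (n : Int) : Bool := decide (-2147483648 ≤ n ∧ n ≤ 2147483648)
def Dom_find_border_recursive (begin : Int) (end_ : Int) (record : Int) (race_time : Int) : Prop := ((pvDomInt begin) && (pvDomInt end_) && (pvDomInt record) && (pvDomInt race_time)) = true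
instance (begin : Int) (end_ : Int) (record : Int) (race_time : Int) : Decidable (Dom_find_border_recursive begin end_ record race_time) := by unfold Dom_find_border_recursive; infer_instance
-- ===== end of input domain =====

-- B replaces A's self-recursive two-endpoint binary search by an iterative loop over a
-- different state (left edge + window width, halved each round, distance inlined);
-- return-value equivalence is proved on Pre_ (begin < end).

-- ===== PORT A =====
def calculate_distance (load_time : Int) (race_time : Int) : Int :=
  (race_time - load_time) * load_time

-- A's recursion, fuel-indexed for totality; fuel (end_-begin).toNat + 1 is never exhausted on Pre_.
def findBorderGo : Nat → Int → Int → Int → Int → Int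
  | 0, _, _, _, _ => 0  -- unreachable on Pre_ (fuel suffices)
  | fuel + 1, begin, end_, record, race_time =>
    if begin + 1 = end_ then begin + 1
    else
      let middle := PySem.Int.floordiv (begin + end_ + 1) 2
      let current_distance := calculate_distance middle race_time
      if current_distance < record then findBorderGo fuel middle end_ record race_time
      else if current_distance > record then findBorderGo fuel begin middle record race_time
      else middle + 1

def find_border_recursive (begin : Int) (end_ : Int) (record : Int) (race_time : Int) : Int :=
  findBorderGo ((end_ - begin).toNat + 1) begin end_ record race_time

-- ===== PORT B =====
-- the while-loop of Source B over state (lo, gap); fuel bounds the iteration count (never exhausted on Pre_)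
def findBorderHalve (record : Int) (race_time : Int) : Nat → Int → Int → Int
  | 0, lo, _ => lo + 1  -- unreachable on Pre_ (fuel suffices)
  | fuel + 1, lo, gap =>
    if gap ≠ 1 then
      let half := PySem.Int.floordiv (gap + 1) 2
      let m := lo + half
      let d := (race_time - m) * m
      if d < record then findBorderHalve record race_time fuel m (gap - half)
      else if d > record then findBorderHalve record race_time fuel lo half
      else m + 1
    else lo + 1

def find_border_recursive_alt (begin : Int) (end_ : Int) (record : Int) (race_time : Int) : Int :=
  findBorderHalve record race_time (end_ - begin).toNat begin (end_ - begin)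

-- ===== PRECONDITION & SPEC =====
-- Pre_: begin < end, the bracketing invariant of the binary search. Outside it the Python recursion
-- does not shrink the interval and overflows the stack (RecursionError) — except on accidental inputs
-- whose first probe hits the record exactly, where A returns immediately.
def Pre_find_border_recursive (begin : Int) (end_ : Int) (record : Int) (race_time : Int) : Prop :=
  begin < end_
instance (begin : Int) (end_ : Int) (record : Int) (race_time : Int) : Decidable (Pre_find_border_recursive begin end_ record race_time) := by unfold Pre_find_border_recursive; infer_instance

def pvWitness_find_border_recursive : Int × Int × Int × Int := (0, 10, 9, 7)

def Spec_find_border_recursive (begin : Int) (end_ : Int) (record : Int) (race_time : Int) (out : Int) : Prop := out = find_border_recursive_alt begin end_ record race_time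
instance (begin : Int) (end_ : Int) (record : Int) (race_time : Int) (out : Int) : Decidable (Spec_find_border_recursive begin end_ record race_time out) := by unfold Spec_find_border_recursive; infer_instance

-- ===== CLAIM =====
def Claim_equal_find_border_recursive : Prop := ∀ (begin : Int) (end_ : Int) (record : Int) (race_time : Int), Dom_find_border_recursive begin end_ record race_time → Pre_find_border_recursive begin end_ record race_time → Spec_find_border_recursive begin end_ record race_time (find_border_recursive begin end_ record race_time)

-- ===== LEMMAS AND PROOFS =====

-- A's midpoint, shifted to the window frame: (b+e+1)//2 = b + (gap+1)//2 for gap = e-b,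
-- together with the bounds 1 ≤ half and half < gap when gap ≥ 2.
lemma mid_shift (b e : Int) (h : b + 1 < e) :
    PySem.Int.floordiv (b + e + 1) 2 = b + PySem.Int.floordiv (e - b + 1) 2 ∧
    1 ≤ PySem.Int.floordiv (e - b + 1) 2 ∧ PySem.Int.floordiv (e - b + 1) 2 < e - b := by
  rw [PySem.Int.floordiv_eq_ediv_of_pos (by omega), PySem.Int.floordiv_eq_ediv_of_pos (by omega)]
  omega

lemma go_eq_halve (r t : Int) :
    ∀ (fa : Nat) (fb : Nat) (b e : Int), b < e → (e - b).toNat ≤ fa → (e - b).toNat ≤ fb + 1 →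
      findBorderGo fa b e r t = findBorderHalve r t fb b (e - b) := by
  intro fa
  induction fa with
  | zero => intro fb b e hlt hfa _; omega
  | succ f ih =>
    intro fb b e hlt hfa hfb
    by_cases hbase : b + 1 = e
    · have hg : e - b = 1 := by omega
      cases fb with
      | zero => simp [findBorderGo, findBorderHalve, hbase, hg]
      | succ fb' => simp [findBorderGo, findBorderHalve, hbase, hg]
    · have hb1 : b + 1 < e := by omega
      obtain ⟨hsh, hh1, hh2⟩ := mid_shift b e hb1
      obtain ⟨fb', rfl⟩ : ∃ fb', fb = fb' + 1 := ⟨fb - 1, by omega⟩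
      simp only [findBorderGo, findBorderHalve, if_neg hbase,
        if_pos (show e - b ≠ 1 by omega)]
      set h := PySem.Int.floordiv (e - b + 1) 2 with hhdef
      rw [hsh]
      have hdist : calculate_distance (b + h) t = (t - (b + h)) * (b + h) := rfl
      rw [hdist]
      split_ifs with h1 h2
      · have := ih fb' (b + h) e (by omega) (by omega) (by omega)
        simpa [show e - (b + h) = e - b - h by ring] using this
      · have := ih fb' b (b + h) (by omega) (by omega) (by omega)
        simpa [show b + h - b = h by ring] using this
      · rfl

-- ===== VERDICT =====
theorem find_border_recursive_spec : Claim_equal_find_border_recursive := by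
  intro b e r t _ hpre
  unfold Spec_find_border_recursive find_border_recursive find_border_recursive_alt
  exact go_eq_halve r t _ _ b e hpre (by omega) (by omega)
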